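-- pv_equiv track=rewrite | github.com/mp-c3-h8/Advent-of-Code-2024 | day2/p1.py | safety_check
-- ===== SOURCE A (Python) =====
-- def safety_check(report: list) -> int:
--     prev_slope = 0
--
--     for i in range(0, len(report)-1):
--         slope = int(report[i]) - int(report[i+1])
--         if slope == 0 or abs(slope) > 3 or prev_slope * slope < 0:
--             return 0
--         prev_slope = slope
--
--     return 1
-- ===== SOURCE B (Python) =====
-- def safety_check(report: list) -> int:
--     diffs = [int(report[i]) - int(report[i + 1]) for i in range(len(report) - 1)]
--     if all(1 <= d <= 3 for d in diffs) or all(-3 <= d <= -1 for d in diffs):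
--         return 1
--     return 0
-- ===== Notes on version B (the rewrite author's own statement) =====
-- stated objective: simpler
-- what changed: Replaces the prev_slope state machine with early return by computing the list of consecutive differences once and testing two whole-list predicates (all in [1,3] or all in [-3,-1]).
import Mathlib
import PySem

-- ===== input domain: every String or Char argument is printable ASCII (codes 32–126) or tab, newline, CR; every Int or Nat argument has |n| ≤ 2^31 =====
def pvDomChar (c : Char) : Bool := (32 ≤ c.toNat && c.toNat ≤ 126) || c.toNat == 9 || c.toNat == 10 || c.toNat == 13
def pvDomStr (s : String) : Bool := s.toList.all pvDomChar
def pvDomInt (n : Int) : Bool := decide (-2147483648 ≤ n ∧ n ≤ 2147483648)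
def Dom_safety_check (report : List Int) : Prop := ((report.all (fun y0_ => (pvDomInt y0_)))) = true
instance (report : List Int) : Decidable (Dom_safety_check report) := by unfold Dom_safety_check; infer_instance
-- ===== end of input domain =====

-- ===== PORT A =====
-- B replaces A's prev_slope state machine with early return by a diffs-list-then-
-- two-whole-list-predicate decomposition (objective: simpler); same O(n) cost.
-- A's loop over i in range(0, len(report)-1), carried state prev_slope, early return 0;
-- ported as structural recursion over the same consecutive pairs.
def safety_check_go (prev : Int) : List Int → Int
  | a :: b :: rest =>
      let slope := a - b
      if slope = 0 ∨ 3 < |slope| ∨ prev * slope < 0 then 0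
      else safety_check_go slope (b :: rest)
  | _ => 1

def safety_check (report : List Int) : Int :=
  safety_check_go 0 report

-- ===== PORT B =====
-- diffs = [report[i] - report[i+1] for consecutive pairs]; 1 if all in [1,3] or all in [-3,-1] else 0
def safety_check_alt (report : List Int) : Int :=
  let diffs := (report.zip report.tail).map (fun p => p.1 - p.2)
  if diffs.all (fun d => decide (1 ≤ d ∧ d ≤ 3)) || diffs.all (fun d => decide (-3 ≤ d ∧ d ≤ -1))
  then 1 else 0

-- ===== PRECONDITION & SPEC =====
def Spec_safety_check (report : List Int) (out : Int) : Prop := out = safety_check_alt report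
instance (report : List Int) (out : Int) : Decidable (Spec_safety_check report out) := by unfold Spec_safety_check; infer_instance

-- ===== CLAIM (what is proved, stated in full; the proofs are below) =====
def Claim_equal_safety_check : Prop := ∀ (report : List Int), Dom_safety_check report → Spec_safety_check report (safety_check report)

-- ===== LEMMAS AND PROOFS =====

-- Loop invariant: safety_check_go prev l is 1 exactly when the consecutive differences of l
-- are all in [1,3] (allowed when prev ≥ 0) or all in [-3,-1] (allowed when prev ≤ 0), else 0.
theorem safety_check_go_eq (l : List Int) : ∀ (prev : Int),
    safety_check_go prev l =
      if (0 ≤ prev ∧ ((l.zip l.tail).map (fun p => p.1 - p.2)).all (fun d => decide (1 ≤ d ∧ d ≤ 3)))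
       ∨ (prev ≤ 0 ∧ ((l.zip l.tail).map (fun p => p.1 - p.2)).all (fun d => decide (-3 ≤ d ∧ d ≤ -1)))
      then 1 else 0 := by
  induction l with
  | nil => intro prev; simp [safety_check_go]; omega
  | cons a tail ih =>
    intro prev
    cases tail with
    | nil => simp [safety_check_go]; omega
    | cons b rest =>
      rw [show safety_check_go prev (a :: b :: rest)
            = (if a - b = 0 ∨ 3 < |a - b| ∨ prev * (a - b) < 0 then 0
               else safety_check_go (a - b) (b :: rest)) from rfl,
          ih (a - b)]
      simp only [List.tail_cons, List.zip_cons_cons, List.map_cons, List.all_cons,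
        Bool.and_eq_true, decide_eq_true_eq]
      by_cases hc : a - b = 0 ∨ 3 < |a - b| ∨ prev * (a - b) < 0
      · rw [if_pos hc, if_neg]
        rintro (⟨hp, ⟨hs1, hs2⟩, -⟩ | ⟨hp, ⟨hs1, hs2⟩, -⟩) <;>
          rcases hc with h | h | h <;>
          first
            | omega
            | (rcases abs_cases (a - b) with ⟨he, _⟩ | ⟨he, _⟩ <;> omega)
            | (rcases mul_neg_iff.mp h with ⟨h1, h2⟩ | ⟨h1, h2⟩ <;> omega)
      · rw [if_neg hc]
        simp only [not_or, not_lt] at hc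
        obtain ⟨h0, h3, hm⟩ := hc
        rcases abs_cases (a - b) with ⟨he, hsgn⟩ | ⟨he, hsgn⟩ <;> rw [he] at h3
        · have hpos : 0 < a - b := by omega
          have hprev : 0 ≤ prev := by
            by_contra h
            exact absurd (mul_neg_of_neg_of_pos (by omega) hpos) (not_lt.mpr hm)
          refine if_congr ?_ rfl rfl
          constructor
          · rintro (⟨-, hA⟩ | ⟨hle, -⟩)
            · exact Or.inl ⟨hprev, ⟨by omega, by omega⟩, hA⟩
            · exact absurd hle (by omega)
          · rintro (⟨-, -, hA⟩ | ⟨-, ⟨-, hs⟩, -⟩)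
            · exact Or.inl ⟨by omega, hA⟩
            · exact absurd hs (by omega)
        · have hneg : a - b < 0 := hsgn
          have hprev : prev ≤ 0 := by
            by_contra h
            exact absurd (mul_neg_of_pos_of_neg (by omega) hneg) (not_lt.mpr hm)
          refine if_congr ?_ rfl rfl
          constructor
          · rintro (⟨hle, -⟩ | ⟨-, hB⟩)
            · exact absurd hle (by omega)
            · exact Or.inr ⟨hprev, ⟨by omega, by omega⟩, hB⟩
          · rintro (⟨-, ⟨hs, -⟩, -⟩ | ⟨-, -, hB⟩)
            · exact absurd hs (by omega)
            · exact Or.inr ⟨by omega, hB⟩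

-- ===== VERDICT (by name: the statement is the Claim_ definition above) =====
theorem safety_check_spec : Claim_equal_safety_check := by
  intro report _
  unfold Spec_safety_check safety_check safety_check_alt
  rw [safety_check_go_eq]
  simp only [Bool.or_eq_true]
  split_ifs with h1 h2 <;> first | rfl | (exfalso; tauto)
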